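-- pv_equiv track=rewrite | github.com/kengiroy2-g/kenobase | all_code/00_0_Keno_6-Kombi_Analyse_V8.py | max_zwei_pro_zehnergruppe
-- ===== SOURCE A (Python) =====
-- def max_zwei_pro_zehnergruppe(kombi):
--     # Erstelle ein Wörterbuch, das die Zehnergruppe als Schlüssel hat
--     zehnergruppen = {}
--     for zahl in kombi:
--         zehner = zahl // 10  # Zehnergruppe finden
--         if zehner not in zehnergruppen:
--             zehnergruppen[zehner] = 0
--         zehnergruppen[zehner] += 1
--
--         # Wenn irgendeine Gruppe mehr als 2 Zahlen enthält, ist die Kombination nicht gültig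
--         if zehnergruppen[zehner] > 2:
--             return False
--     return True
-- ===== SOURCE B (Python) =====
-- def max_zwei_pro_zehnergruppe(kombi):
--     # dict-free brute force: for each number, count how many numbers of the
--     # whole combination share its decade; valid iff no decade reaches 3
--     return all(sum(1 for andere in kombi if andere // 10 == zahl // 10) <= 2
--                for zahl in kombi)
-- ===== Notes on version B (the rewrite author's own statement) =====
-- stated objective: alternative
-- what changed: Dropped the incrementally-built dict with its early exit and replaced it by a dict-free nested scan: for each element count over the whole list how many elements share its decade, and require every such count to be at most 2.
import Mathlib
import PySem

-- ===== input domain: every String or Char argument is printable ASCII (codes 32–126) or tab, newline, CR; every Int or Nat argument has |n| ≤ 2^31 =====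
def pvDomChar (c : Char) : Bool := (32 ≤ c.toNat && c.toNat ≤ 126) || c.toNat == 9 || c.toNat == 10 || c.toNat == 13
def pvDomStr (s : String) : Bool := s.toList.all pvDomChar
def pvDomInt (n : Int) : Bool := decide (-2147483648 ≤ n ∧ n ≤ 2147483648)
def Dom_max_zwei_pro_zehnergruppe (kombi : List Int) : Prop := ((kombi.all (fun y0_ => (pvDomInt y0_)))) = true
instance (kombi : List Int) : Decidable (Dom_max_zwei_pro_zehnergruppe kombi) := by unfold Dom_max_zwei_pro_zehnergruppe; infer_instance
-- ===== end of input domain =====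

-- B replaces A's incrementally-built dict with early exit by a dict-free nested scan over the whole list (alternative algorithm, not faster).


-- ===== PORT A =====
-- the for-loop with its early 'return False', as structural recursion over the state (the dict)
def maxA_loop (zehnergruppen : PySem.Dict Int Int) : List Int → Bool
  | [] => true
  | zahl :: rest =>
    let zehner := PySem.Int.floordiv zahl 10
    let d1 := if zehnergruppen.contains zehner then zehnergruppen else zehnergruppen.insert zehner 0
    let d2 := d1.insert zehner (d1.getD zehner 0 + 1)
    if d2.getD zehner 0 > 2 then false else maxA_loop d2 rest

def max_zwei_pro_zehnergruppe (kombi : List Int) : Bool :=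
  maxA_loop PySem.Dict.empty kombi

-- ===== PORT B =====
-- Source B's all(sum(1 for andere in kombi if andere // 10 == zahl // 10) <= 2 for zahl in kombi):
-- the inner generator-sum is a countP over the whole list
def max_zwei_pro_zehnergruppe_alt (kombi : List Int) : Bool :=
  kombi.all (fun zahl =>
    decide ((kombi.countP (fun andere =>
      PySem.Int.floordiv andere 10 == PySem.Int.floordiv zahl 10) : Int) ≤ 2))

-- ===== PRECONDITION & SPEC =====
def Spec_max_zwei_pro_zehnergruppe (kombi : List Int) (out : Bool) : Prop := out = max_zwei_pro_zehnergruppe_alt kombi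
instance (kombi : List Int) (out : Bool) : Decidable (Spec_max_zwei_pro_zehnergruppe kombi out) := by unfold Spec_max_zwei_pro_zehnergruppe; infer_instance

-- ===== CLAIM (what is proved, stated in full; the proofs are below) =====
def Claim_equal_max_zwei_pro_zehnergruppe : Prop := ∀ (kombi : List Int), Dom_max_zwei_pro_zehnergruppe kombi → Spec_max_zwei_pro_zehnergruppe kombi (max_zwei_pro_zehnergruppe kombi)

-- ===== LEMMAS AND PROOFS =====

-- one loop step changes exactly the updated key's count
theorem maxA_step_getD (d : PySem.Dict Int Int) (k0 j : Int) :
    (((if d.contains k0 then d else d.insert k0 0).insert k0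
        ((if d.contains k0 then d else d.insert k0 0).getD k0 0 + 1)).getD j 0)
      = if j = k0 then d.getD k0 0 + 1 else d.getD j 0 := by
  by_cases hc : d.contains k0 = true
  · simp [hc, PySem.Dict.getD_insert]
  · have hc' : d.contains k0 = false := by revert hc; cases d.contains k0 <;> simp
    have h0 : d.getD k0 0 = 0 := PySem.Dict.getD_of_not_contains d 0 hc'
    simp only [hc', Bool.false_eq_true, if_false, PySem.Dict.getD_insert, h0]
    split_ifs <;> simp

-- characterisation of A's loop: given all current counts ≤ 2, it returns true
-- iff every key's current count plus its remaining occurrences stays ≤ 2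
theorem maxA_loop_iff (l : List Int) (d : PySem.Dict Int Int)
    (hd : ∀ k, d.getD k 0 ≤ 2) :
    maxA_loop d l = true ↔
      ∀ k, d.getD k 0 + ((l.map (fun z => PySem.Int.floordiv z 10)).count k : Int) ≤ 2 := by
  induction l generalizing d with
  | nil => simp [maxA_loop, hd]
  | cons z rest ih =>
    simp only [maxA_loop, maxA_step_getD, List.map_cons, List.count_cons, if_true]
    by_cases hbig : d.getD (PySem.Int.floordiv z 10) 0 + 1 > 2
    · rw [if_pos hbig]
      simp only [Bool.false_eq_true, false_iff, not_forall]
      refine ⟨PySem.Int.floordiv z 10, ?_⟩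
      have hcnt : 0 ≤ ((rest.map (fun z => PySem.Int.floordiv z 10)).count
          (PySem.Int.floordiv z 10) : Int) := by positivity
      simp only [beq_self_eq_true, if_pos, not_le]
      push_cast
      omega
    · rw [if_neg hbig]
      have hd2 : ∀ k, (((if d.contains (PySem.Int.floordiv z 10) then d
            else d.insert (PySem.Int.floordiv z 10) 0).insert (PySem.Int.floordiv z 10)
            ((if d.contains (PySem.Int.floordiv z 10) then d
            else d.insert (PySem.Int.floordiv z 10) 0).getD (PySem.Int.floordiv z 10) 0 + 1)).getD k 0) ≤ 2 := by
        intro k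
        rw [maxA_step_getD]
        split_ifs with h
        · omega
        · exact hd k
      rw [ih _ hd2]
      simp only [maxA_step_getD]
      refine forall_congr' fun k => ?_
      by_cases h : k = PySem.Int.floordiv z 10
      · subst h
        simp only [beq_self_eq_true, if_true]
        push_cast
        constructor <;> intro <;> omega
      · have h' : (PySem.Int.floordiv z 10 == k) = false :=
          beq_eq_false_iff_ne.mpr (fun e => h e.symm)
        simp only [if_neg h, h', Bool.false_eq_true, if_false]
        push_cast
        constructor <;> intro <;> omega

-- the inner count of B at element z is the count of z's decade in the decade image
theorem alt_countP_eq (kombi : List Int) (z : Int) :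
    kombi.countP (fun andere =>
        PySem.Int.floordiv andere 10 == PySem.Int.floordiv z 10)
      = (kombi.map (fun a => PySem.Int.floordiv a 10)).count (PySem.Int.floordiv z 10) := by
  simp only [List.count, List.countP_map]
  rfl

-- characterisation of B: true iff every decade count over the image is ≤ 2
theorem alt_iff (kombi : List Int) :
    max_zwei_pro_zehnergruppe_alt kombi = true ↔
      ∀ k, (((kombi.map (fun z => PySem.Int.floordiv z 10)).count k : Int)) ≤ 2 := by
  simp only [max_zwei_pro_zehnergruppe_alt, List.all_eq_true, decide_eq_true_eq]
  constructor
  · intro h k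
    by_cases hm : k ∈ kombi.map (fun z => PySem.Int.floordiv z 10)
    · obtain ⟨z, hz, rfl⟩ := List.mem_map.mp hm
      have := h z hz
      rwa [alt_countP_eq] at this
    · rw [List.count_eq_zero_of_not_mem hm]; norm_num
  · intro h z _
    rw [alt_countP_eq]
    exact h _

-- ===== VERDICT (by name: the statement is the Claim_ definition above) =====
theorem max_zwei_pro_zehnergruppe_spec : Claim_equal_max_zwei_pro_zehnergruppe := by
  intro kombi _
  unfold Spec_max_zwei_pro_zehnergruppe max_zwei_pro_zehnergruppe
  rw [Bool.eq_iff_iff, maxA_loop_iff _ _ (by intro k; simp [PySem.Dict.getD_empty]),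
    alt_iff]
  constructor
  · intro h k; have := h k; simpa [PySem.Dict.getD_empty] using this
  · intro h k; simpa [PySem.Dict.getD_empty] using h k
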